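-- pv_equiv track=rewrite | github.com/vishenka-git/RuREBus | rurebus2seqlab.py | get_bio_spans
-- ===== SOURCE A (Python) =====
-- def get_bio_spans(tags):
--     start_ids = [i for i, tag in enumerate(tags) if tag.startswith('B-')]
--     additional_start_ids = []
--     prev_tag = 'O'
--     for i, tag in enumerate(tags):
--         if tag.startswith('I-') and prev_tag == 'O':
--             additional_start_ids.append(i)
--         prev_tag = tag
--     start_ids += additional_start_ids
--
--     stop_ids = []
--     for start_id in start_ids:
--         stop_id = start_id + 1
--         while stop_id < len(tags) and tags[stop_id].startswith('I-'):
--             stop_id += 1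
--         stop_ids.append(stop_id - 1)
--     spans = [(start_id, stop_id) for start_id, stop_id in zip(start_ids, stop_ids)]
--     return spans
-- ===== SOURCE B (Python) =====
-- def get_bio_spans(tags):
--     # One single-sweep alternative: precompute each position's I-run end right-to-left,
--     # then collect B-initiated and O-preceded-I-initiated spans in one sweep.
--     n = len(tags)
--     run = [0] * n
--     for i in range(n - 1, -1, -1):
--         run[i] = run[i + 1] if i + 1 < n and tags[i + 1].startswith('I-') else i
--     b_spans = []
--     i_spans = []
--     prev = 'O'
--     for i, tag in enumerate(tags):
--         if tag.startswith('B-'):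
--             b_spans.append((i, run[i]))
--         elif tag.startswith('I-') and prev == 'O':
--             i_spans.append((i, run[i]))
--         prev = tag
--     return b_spans + i_spans
-- ===== Notes on version B (the rewrite author's own statement) =====
-- stated objective: alternative
-- what changed: Instead of collecting all start indices and then re-scanning forward from each start with an inner while loop, B precomputes each position's I-run end in one right-to-left pass and emits B-initiated and O-preceded-I-initiated spans in a single forward sweep, concatenating the two groups to keep A's output order.
import Mathlib
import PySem

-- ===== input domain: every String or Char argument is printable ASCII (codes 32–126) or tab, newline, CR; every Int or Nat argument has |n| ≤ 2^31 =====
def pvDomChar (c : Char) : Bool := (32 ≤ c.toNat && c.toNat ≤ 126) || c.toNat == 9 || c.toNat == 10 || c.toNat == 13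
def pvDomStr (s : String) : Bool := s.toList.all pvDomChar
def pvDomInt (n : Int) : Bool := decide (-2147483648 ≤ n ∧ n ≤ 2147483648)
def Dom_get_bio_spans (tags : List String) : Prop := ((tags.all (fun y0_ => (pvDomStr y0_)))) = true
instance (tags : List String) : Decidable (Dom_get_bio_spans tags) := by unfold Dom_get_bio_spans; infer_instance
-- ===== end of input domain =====

-- B replaces A's per-start inner while-scan by a single right-to-left precomputation
-- of run ends plus one forward sweep (objective: alternative).

-- ===== PORT A =====
-- A's 'for i, tag in enumerate(tags): if tag.startswith('I-') and prev_tag == 'O': append' loop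
def pvAdd : List (Int × String) → List Int → String → List Int
  | [], acc, _ => acc
  | (i, t) :: rest, acc, prev =>
      pvAdd rest (if PySem.Str.startswith t "I-" && (prev == "O") then acc ++ [i] else acc) t

-- A's 'while stop_id < len(tags) and tags[stop_id].startswith('I-'): stop_id += 1' loop
def pvFindStop (tags : List String) (stop : Nat) : Nat :=
  if h : stop < tags.length then
    if PySem.Str.startswith tags[stop] "I-" then pvFindStop tags (stop + 1) else stop
  else stop
termination_by tags.length - stop

def get_bio_spans (tags : List String) : List (Int × Int) :=
  let start_ids := ((PySem.List.enumerate tags).filter (fun p => PySem.Str.startswith p.2 "B-")).map (·.1)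
  let start_ids := start_ids ++ pvAdd (PySem.List.enumerate tags) [] "O"
  -- '.toNat' is exact here: every start_id comes from enumerate, so start_id + 1 ≥ 1
  let stop_ids := start_ids.map (fun s => (pvFindStop tags (s + 1).toNat : Int) - 1)
  (start_ids.zip stop_ids)

-- ===== PORT B =====
-- Source B's backward loop filling run[i] = run[i+1] if tags[i+1] starts with 'I-' else i
def pvRun : List String → Nat → List Nat
  | [], _ => []
  | _ :: rest, i =>
      (if PySem.Str.startswith (rest.headD "") "I-" then (pvRun rest (i + 1)).headD i else i)
        :: pvRun rest (i + 1)

-- Source B's forward sweep over (tag, run) with the previous tag as state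
def pvFwd : List (String × Nat) → Nat → String → List (Int × Int) × List (Int × Int)
  | [], _, _ => ([], [])
  | (t, r) :: rest, i, prev =>
      let acc := pvFwd rest (i + 1) t
      if PySem.Str.startswith t "B-" then (((i : Int), (r : Int)) :: acc.1, acc.2)
      else if PySem.Str.startswith t "I-" && (prev == "O") then (acc.1, ((i : Int), (r : Int)) :: acc.2)
      else acc

def get_bio_spans_alt (tags : List String) : List (Int × Int) :=
  let p := pvFwd (tags.zip (pvRun tags 0)) 0 "O"
  p.1 ++ p.2

-- ===== PRECONDITION & SPEC =====
def Spec_get_bio_spans (tags : List String) (out : List (Int × Int)) : Prop := out = get_bio_spans_alt tags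
instance (tags : List String) (out : List (Int × Int)) : Decidable (Spec_get_bio_spans tags out) := by unfold Spec_get_bio_spans; infer_instance

-- ===== CLAIM (what is proved, stated in full; the proofs are below) =====
def Claim_equal_get_bio_spans : Prop := ∀ (tags : List String), Dom_get_bio_spans tags → Spec_get_bio_spans tags (get_bio_spans tags)

-- ===== LEMMAS AND PROOFS =====

-- number of leading 'I-' tags
def pvF : List String → Nat
  | [] => 0
  | t :: rest => if PySem.Str.startswith t "I-" then pvF rest + 1 else 0

-- canonical one-pass description both ports are reduced to
def spansOf : List String → Nat → String → List (Int × Int) × List (Int × Int)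
  | [], _, _ => ([], [])
  | t :: rest, i, prev =>
      let acc := spansOf rest (i + 1) t
      if PySem.Str.startswith t "B-" then (((i : Int), ((i + pvF rest : Nat) : Int)) :: acc.1, acc.2)
      else if PySem.Str.startswith t "I-" && (prev == "O") then (acc.1, ((i : Int), ((i + pvF rest : Nat) : Int)) :: acc.2)
      else acc

theorem not_B_and_I (t : String) :
    ¬(PySem.Str.startswith t "B-" = true ∧ PySem.Str.startswith t "I-" = true) := by
  rintro ⟨hb, hi⟩
  rw [PySem.Str.startswith_eq, PySem.Chars.startswith_iff] at hb hi
  obtain ⟨u, hu⟩ := hb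
  obtain ⟨v, hv⟩ := hi
  have hB : "B-".toList = ['B', '-'] := by decide
  have hI : "I-".toList = ['I', '-'] := by decide
  rw [hB] at hu
  rw [hI] at hv
  rw [← hv] at hu
  simp only [List.cons_append, List.nil_append, List.cons.injEq] at hu
  exact absurd hu.1 (by decide)

theorem pvFindStop_eq (tags : List String) (j : Nat) :
    pvFindStop tags j = j + pvF (tags.drop j) := by
  by_cases h : j < tags.length
  · have hd : tags.drop j = tags[j] :: tags.drop (j + 1) := List.drop_eq_getElem_cons h
    rw [pvFindStop, dif_pos h]
    by_cases hs : PySem.Str.startswith tags[j] "I-" = true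
    · rw [if_pos hs, pvFindStop_eq tags (j + 1), hd, pvF, if_pos hs]; omega
    · rw [if_neg hs, hd, pvF, if_neg hs]; rfl
  · rw [pvFindStop, dif_neg h, List.drop_eq_nil_of_le (Nat.le_of_not_lt h), pvF]; rfl

termination_by tags.length - j

theorem pvRun_cons (rest : List String) : ∀ (t : String) (i : Nat),
    pvRun (t :: rest) i = (i + pvF rest) :: pvRun rest (i + 1) := by
  induction rest with
  | nil =>
      intro t i
      have he : PySem.Str.startswith "" "I-" = false := by decide
      simp [pvRun, pvF, he]
  | cons t' r' ih =>
      intro t i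
      rw [pvRun]
      rw [ih t' (i + 1)]
      simp only [List.headD_cons, pvF]
      by_cases hs : PySem.Chars.startswith t'.toList ['I', '-'] = true <;> simp [hs] <;> omega

theorem pvFwd_eq (s : List String) : ∀ (i : Nat) (prev : String),
    pvFwd (s.zip (pvRun s i)) i prev = spansOf s i prev := by
  induction s with
  | nil => intro i prev; rfl
  | cons t rest ih =>
      intro i prev
      rw [pvRun_cons, List.zip_cons_cons]
      simp only [pvFwd, spansOf, ih]

theorem pvAdd_acc (l : List (Int × String)) : ∀ (acc : List Int) (prev : String),
    pvAdd l acc prev = acc ++ pvAdd l [] prev := by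
  induction l with
  | nil => intro acc prev; simp [pvAdd]
  | cons p rest ih =>
      intro acc prev
      obtain ⟨i, t⟩ := p
      rw [pvAdd, pvAdd, ih]
      conv_rhs => rw [ih]
      split <;> rename_i hx <;> simp [hx]

theorem spansOf_eq_A (tags : List String) (j : Nat) (prev : String) :
    spansOf (tags.drop j) j prev =
      ( ((PySem.List.enumerate (tags.drop j) (j : Int)).filter (fun p => PySem.Str.startswith p.2 "B-")).map
          (fun p => (p.1, (pvFindStop tags (p.1 + 1).toNat : Int) - 1)),
        (pvAdd (PySem.List.enumerate (tags.drop j) (j : Int)) [] prev).map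
          (fun s => (s, (pvFindStop tags (s + 1).toNat : Int) - 1)) ) := by
  by_cases h : j < tags.length
  · have hd : tags.drop j = tags[j] :: tags.drop (j + 1) := List.drop_eq_getElem_cons h
    have ih := spansOf_eq_A tags (j + 1) tags[j]
    have hcast : (j : Int) + 1 = ((j + 1 : Nat) : Int) := by push_cast; ring
    have hstop : ((pvFindStop tags ((j : Int) + 1).toNat : Int)) - 1
        = ((j + pvF (tags.drop (j + 1)) : Nat) : Int) := by
      have h1 : ((j : Int) + 1).toNat = j + 1 := by omega
      rw [h1, pvFindStop_eq]
      push_cast; ring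
    rw [hd, PySem.List.enumerate_cons, hcast]
    by_cases hb : PySem.Str.startswith tags[j] "B-" = true
    · have hi' : PySem.Str.startswith tags[j] "I-" = false := by
        by_contra hx
        exact not_B_and_I tags[j] ⟨hb, by simpa using hx⟩
      simp only [spansOf, List.filter_cons, pvAdd, hb, hi', if_pos, Bool.false_and,
        Bool.and_eq_true, if_true, if_false, List.map_cons, ih, hstop]
      simp [hstop, ← hcast]
    · by_cases hio : (PySem.Str.startswith tags[j] "I-" && (prev == "O")) = true
      · simp only [spansOf, List.filter_cons, pvAdd, hb, hio, if_false, if_true,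
          List.nil_append, pvAdd_acc _ [((j:Int))], List.map_cons, List.map_append, ih]
        simp [hstop, ← hcast, ih]
        rw [pvFindStop_eq]
        push_cast
        ring
      · simp only [spansOf, List.filter_cons, pvAdd, hb, hio, if_false, ih]
        simp [hb, hio, ← hcast, ih]
  · have hnil : tags.drop j = [] := List.drop_eq_nil_of_le (Nat.le_of_not_lt h)
    simp [hnil, spansOf, pvAdd, PySem.List.enumerate_nil]
termination_by tags.length - j

theorem zip_map_self {α β : Type} (l : List α) (f : α → β) :
    l.zip (l.map f) = l.map (fun x => (x, f x)) := by
  induction l with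
  | nil => rfl
  | cons x xs ih => simp [ih]

-- ===== VERDICT (by name: the statement is the Claim_ definition above) =====
theorem get_bio_spans_spec : Claim_equal_get_bio_spans := by
  intro tags _
  show get_bio_spans tags = get_bio_spans_alt tags
  have h := spansOf_eq_A tags 0 "O"
  simp only [List.drop_zero, Nat.cast_zero] at h
  simp only [get_bio_spans, get_bio_spans_alt]
  rw [pvFwd_eq, h, zip_map_self, List.map_append, List.map_map]
  rfl
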